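-- pv_equiv track=rewrite | github.com/farzadnadiri/mcp-ecu | src/mcp_can/obd.py | _supported_mask
-- ===== SOURCE A (Python) =====
-- from typing import List, Optional, Tuple
--
-- def _supported_mask(pids: List[int]) -> Tuple[int, int, int, int]:
--     """Return 4 bytes bitmask for PIDs 0x01-0x20."""
--     mask = [0, 0, 0, 0]
--     for pid in pids:
--         if 0x01 <= pid <= 0x20:
--             idx = (pid - 1) // 8
--             bit = 7 - ((pid - 1) % 8)
--             mask[idx] |= (1 << bit)
--     return (mask[0], mask[1], mask[2], mask[3])
-- ===== SOURCE B (Python) =====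
-- from typing import List, Tuple
--
-- def _supported_mask(pids: List[int]) -> Tuple[int, int, int, int]:
--     """Return 4 bytes bitmask for PIDs 0x01-0x20.
--
--     Output-driven: build the set of PIDs once, then compute each of the
--     32 output bits by a membership test on its own PID number."""
--     present = set(pids)
--
--     def byte(j):
--         v = 0
--         for k in range(8):
--             if 8 * j + k + 1 in present:
--                 v |= 1 << (7 - k)
--         return v
--
--     return (byte(0), byte(1), byte(2), byte(3))
-- ===== Notes on version B (the rewrite author's own statement) =====
-- stated objective: alternative
-- what changed: B inverts the direction of the computation: instead of A's input-driven pass that mutates a 4-byte list per PID, B builds a set of the PIDs once and then computes each of the 32 output bits by a membership query for that bit's own PID number.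
import Mathlib
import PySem

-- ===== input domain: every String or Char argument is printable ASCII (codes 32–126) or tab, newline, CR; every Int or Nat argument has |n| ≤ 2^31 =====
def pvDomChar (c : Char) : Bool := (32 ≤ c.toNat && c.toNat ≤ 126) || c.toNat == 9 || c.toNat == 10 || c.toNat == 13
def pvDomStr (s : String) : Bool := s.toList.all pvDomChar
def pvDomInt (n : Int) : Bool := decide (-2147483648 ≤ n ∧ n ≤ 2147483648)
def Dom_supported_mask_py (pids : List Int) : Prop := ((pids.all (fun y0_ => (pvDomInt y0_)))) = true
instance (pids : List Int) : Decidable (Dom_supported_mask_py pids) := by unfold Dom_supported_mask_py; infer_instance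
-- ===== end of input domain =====

-- B inverts the direction of the computation: it builds the set of PIDs once and computes each
-- of the 32 output bits by a membership query, instead of A's per-PID pass mutating a 4-byte list.

set_option maxRecDepth 4000


-- ===== PORT A =====
-- one iteration of A's loop body (mask[idx] |= 1 << bit); under the guard
-- 0 ≤ pid-1 ≤ 31, so idx ∈ [0,3], bit ∈ [0,7] and '.toNat' on bit is exact.
def pvStepA (mask : List Int) (pid : Int) : List Int :=
  if 1 ≤ pid ∧ pid ≤ 32 then
    let idx := PySem.Int.floordiv (pid - 1) 8
    let bit := 7 - PySem.Int.mod (pid - 1) 8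
    PySem.List.pySetD mask idx
      (PySem.Int.bor (PySem.List.pyGetD mask idx 0) ((1 : Int) <<< bit.toNat))
  else mask

def supported_mask_py (pids : List Int) : Int × Int × Int × Int :=
  let mask := pids.foldl pvStepA [0, 0, 0, 0]
  (PySem.List.pyGetD mask 0 0, PySem.List.pyGetD mask 1 0,
   PySem.List.pyGetD mask 2 0, PySem.List.pyGetD mask 3 0)

-- ===== PORT B =====
-- one iteration of B's inner loop body (v |= 1 << (7-k) if 8*j+k+1 in present);
-- k ∈ [0,7], so '.toNat' on the shift amount is exact.
def pvStepB (present : PySem.Set Int) (j : Int) (v : Int) (k : Int) : Int :=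
  if PySem.Set.contains present (8 * j + k + 1) then
    PySem.Int.bor v ((1 : Int) <<< (7 - k).toNat)
  else v

-- B's helper 'byte(j)': fold of the inner loop over range(8)
def pvByteB (present : PySem.Set Int) (j : Int) : Int :=
  (PySem.List.pyRange 0 8 1).foldl (pvStepB present j) 0

def supported_mask_py_alt (pids : List Int) : Int × Int × Int × Int :=
  let present := PySem.Set.ofList pids
  (pvByteB present 0, pvByteB present 1, pvByteB present 2, pvByteB present 3)

-- ===== PRECONDITION & SPEC =====
def Spec_supported_mask_py (pids : List Int) (out : Int × Int × Int × Int) : Prop := out = supported_mask_py_alt pids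
instance (pids : List Int) (out : Int × Int × Int × Int) : Decidable (Spec_supported_mask_py pids out) := by unfold Spec_supported_mask_py; infer_instance

-- ===== CLAIM (what is proved, stated in full; the proofs are below) =====
def Claim_equal_supported_mask_py : Prop := ∀ (pids : List Int), Dom_supported_mask_py pids → Spec_supported_mask_py pids (supported_mask_py pids)

-- ===== LEMMAS AND PROOFS =====

lemma pv_shift_one (n : Nat) : ((1 : Int) <<< n) = ((2 ^ n : Nat) : Int) := by
  rw [show ((2 : Nat) ^ n) = 1 <<< n by rw [Nat.one_shiftLeft], Int.natCast_shiftLeft]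
  norm_num

lemma pv_bor_natCast (m n : Nat) : PySem.Int.bor (m : Int) (n : Int) = ((m ||| n : Nat) : Int) := by
  simp [PySem.Int.bor]

lemma pv_bor_pow (m k : Nat) : PySem.Int.bor (m : Int) ((1 : Int) <<< k) = ((m ||| 2 ^ k : Nat) : Int) := by
  rw [pv_shift_one]
  exact pv_bor_natCast m (2 ^ k)

lemma pv_testBit_or_pow (x k t : Nat) :
    (x ||| 2 ^ k).testBit t = (x.testBit t || decide (t = k)) := by
  by_cases h : t = k
  · subst h; simp [Nat.testBit_or]
  · simp [Nat.testBit_or, h, Ne.symm h]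

-- bit t of A's byte j after processing list l (a closed form for A's result)
def pvBitA (l : List Int) (j : Int) (t : Nat) : Bool :=
  decide (t < 8 ∧ (8 * j + 8 - (t : Int)) ∈ l)

lemma pvA_fold (l : List Int) : ∀ (a b c d : Nat),
    ∃ a' b' c' d' : Nat,
      l.foldl pvStepA [(a : Int), (b : Int), (c : Int), (d : Int)]
        = [(a' : Int), (b' : Int), (c' : Int), (d' : Int)] ∧
      (∀ t, a'.testBit t = (a.testBit t || pvBitA l 0 t)) ∧
      (∀ t, b'.testBit t = (b.testBit t || pvBitA l 1 t)) ∧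
      (∀ t, c'.testBit t = (c.testBit t || pvBitA l 2 t)) ∧
      (∀ t, d'.testBit t = (d.testBit t || pvBitA l 3 t)) := by
  induction l with
  | nil =>
      intro a b c d
      exact ⟨a, b, c, d, rfl, by simp [pvBitA], by simp [pvBitA], by simp [pvBitA], by simp [pvBitA]⟩
  | cons p xs ih =>
      intro a b c d
      rw [List.foldl_cons]
      by_cases hg : 1 ≤ p ∧ p ≤ 32
      · obtain ⟨q, hq, rfl⟩ : ∃ q : Nat, q < 32 ∧ p = (q : Int) + 1 :=
          ⟨(p - 1).toNat, by omega, by omega⟩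
        have hfd : PySem.Int.floordiv ((q : Int) + 1 - 1) 8 = ((q / 8 : Nat) : Int) := by
          rw [show ((q : Int) + 1 - 1) = (q : Int) by ring]
          exact_mod_cast PySem.Int.floordiv_natCast q 8
        have hmod : (7 - PySem.Int.mod ((q : Int) + 1 - 1) 8).toNat = 7 - q % 8 := by
          rw [show ((q : Int) + 1 - 1) = (q : Int) by ring,
              show ((8 : Int)) = ((8 : Nat) : Int) from rfl, PySem.Int.mod_natCast]
          omega
        -- the byte that q lands in: the OR'd bit corresponds to membership of q+1
        have hcons : ∀ (j : Int) (t : Nat), ((q / 8 : Nat) : Int) = j →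
            (decide (t = 7 - q % 8) || pvBitA xs j t) = pvBitA (((q : Int) + 1) :: xs) j t := by
          intro j t hqj
          unfold pvBitA
          rw [Bool.or_comm, ← Bool.decide_or, decide_eq_decide]
          constructor
          · rintro (⟨ht, hm⟩ | ht)
            · exact ⟨ht, List.mem_cons_of_mem _ hm⟩
            · exact ⟨by omega, List.mem_cons.mpr (Or.inl (by omega))⟩
          · rintro ⟨ht, hm⟩
            rcases List.mem_cons.mp hm with he | hm
            · right; omega
            · exact Or.inl ⟨ht, hm⟩
        -- the other bytes are untouched, and q+1 is not one of their PIDs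
        have hmiss : ∀ (j : Int) (t : Nat), ((q / 8 : Nat) : Int) ≠ j →
            pvBitA xs j t = pvBitA (((q : Int) + 1) :: xs) j t := by
          intro j t hqj
          unfold pvBitA
          rw [decide_eq_decide]
          constructor
          · rintro ⟨ht, hm⟩; exact ⟨ht, List.mem_cons_of_mem _ hm⟩
          · rintro ⟨ht, hm⟩
            rcases List.mem_cons.mp hm with he | hm
            · exfalso; omega
            · exact ⟨ht, hm⟩
        unfold pvStepA
        rw [if_pos (by constructor <;> omega)]
        simp only [hfd]
        have hq4 : q / 8 = 0 ∨ q / 8 = 1 ∨ q / 8 = 2 ∨ q / 8 = 3 := by omega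
        rcases hq4 with hj | hj | hj | hj <;> rw [hj] <;>
          simp only [Nat.cast_zero, Nat.cast_one, Nat.cast_ofNat]
        · have hset : PySem.List.pySetD [(a : Int), (b : Int), (c : Int), (d : Int)] (0 : Int)
              (PySem.Int.bor (PySem.List.pyGetD [(a : Int), (b : Int), (c : Int), (d : Int)] (0 : Int) 0)
                ((1 : Int) <<< (7 - PySem.Int.mod ((q : Int) + 1 - 1) 8).toNat))
              = [((a ||| 2 ^ (7 - q % 8) : Nat) : Int), (b : Int), (c : Int), (d : Int)] := by
            have h78 : ((7 : Int) - (q : Int) % 8).toNat = 7 - q % 8 := by omega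
            simp [PySem.List.pyGetD, PySem.List.pyIdx?, PySem.List.pySetD, PySem.List.pySet?,
                  pv_bor_pow, h78]
          obtain ⟨a', b', c', d', heq, h0, h1, h2, h3⟩ := ih (a ||| 2 ^ (7 - q % 8)) b c d
          refine ⟨a', b', c', d', by rw [hset]; exact heq, fun t => ?_, fun t => ?_, fun t => ?_, fun t => ?_⟩
          · rw [h0, pv_testBit_or_pow, Bool.or_assoc, hcons 0 t (by simp [hj])]
          · rw [h1, hmiss 1 t (by simp [hj])]
          · rw [h2, hmiss 2 t (by simp [hj])]
          · rw [h3, hmiss 3 t (by simp [hj])]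
        · have hset : PySem.List.pySetD [(a : Int), (b : Int), (c : Int), (d : Int)] (1 : Int)
              (PySem.Int.bor (PySem.List.pyGetD [(a : Int), (b : Int), (c : Int), (d : Int)] (1 : Int) 0)
                ((1 : Int) <<< (7 - PySem.Int.mod ((q : Int) + 1 - 1) 8).toNat))
              = [(a : Int), ((b ||| 2 ^ (7 - q % 8) : Nat) : Int), (c : Int), (d : Int)] := by
            have h78 : ((7 : Int) - (q : Int) % 8).toNat = 7 - q % 8 := by omega
            simp [PySem.List.pyGetD, PySem.List.pyIdx?, PySem.List.pySetD, PySem.List.pySet?,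
                  pv_bor_pow, h78]
          obtain ⟨a', b', c', d', heq, h0, h1, h2, h3⟩ := ih a (b ||| 2 ^ (7 - q % 8)) c d
          refine ⟨a', b', c', d', by rw [hset]; exact heq, fun t => ?_, fun t => ?_, fun t => ?_, fun t => ?_⟩
          · rw [h0, hmiss 0 t (by simp [hj])]
          · rw [h1, pv_testBit_or_pow, Bool.or_assoc, hcons 1 t (by simp [hj])]
          · rw [h2, hmiss 2 t (by simp [hj])]
          · rw [h3, hmiss 3 t (by simp [hj])]
        · have hset : PySem.List.pySetD [(a : Int), (b : Int), (c : Int), (d : Int)] (2 : Int)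
              (PySem.Int.bor (PySem.List.pyGetD [(a : Int), (b : Int), (c : Int), (d : Int)] (2 : Int) 0)
                ((1 : Int) <<< (7 - PySem.Int.mod ((q : Int) + 1 - 1) 8).toNat))
              = [(a : Int), (b : Int), ((c ||| 2 ^ (7 - q % 8) : Nat) : Int), (d : Int)] := by
            have h78 : ((7 : Int) - (q : Int) % 8).toNat = 7 - q % 8 := by omega
            simp [PySem.List.pyGetD, PySem.List.pyIdx?, PySem.List.pySetD, PySem.List.pySet?,
                  pv_bor_pow, h78]
          obtain ⟨a', b', c', d', heq, h0, h1, h2, h3⟩ := ih a b (c ||| 2 ^ (7 - q % 8)) d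
          refine ⟨a', b', c', d', by rw [hset]; exact heq, fun t => ?_, fun t => ?_, fun t => ?_, fun t => ?_⟩
          · rw [h0, hmiss 0 t (by simp [hj])]
          · rw [h1, hmiss 1 t (by simp [hj])]
          · rw [h2, pv_testBit_or_pow, Bool.or_assoc, hcons 2 t (by simp [hj])]
          · rw [h3, hmiss 3 t (by simp [hj])]
        · have hset : PySem.List.pySetD [(a : Int), (b : Int), (c : Int), (d : Int)] (3 : Int)
              (PySem.Int.bor (PySem.List.pyGetD [(a : Int), (b : Int), (c : Int), (d : Int)] (3 : Int) 0)
                ((1 : Int) <<< (7 - PySem.Int.mod ((q : Int) + 1 - 1) 8).toNat))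
              = [(a : Int), (b : Int), (c : Int), ((d ||| 2 ^ (7 - q % 8) : Nat) : Int)] := by
            have h78 : ((7 : Int) - (q : Int) % 8).toNat = 7 - q % 8 := by omega
            simp [PySem.List.pyGetD, PySem.List.pyIdx?, PySem.List.pySetD, PySem.List.pySet?,
                  pv_bor_pow, h78]
          obtain ⟨a', b', c', d', heq, h0, h1, h2, h3⟩ := ih a b c (d ||| 2 ^ (7 - q % 8))
          refine ⟨a', b', c', d', by rw [hset]; exact heq, fun t => ?_, fun t => ?_, fun t => ?_, fun t => ?_⟩
          · rw [h0, hmiss 0 t (by simp [hj])]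
          · rw [h1, hmiss 1 t (by simp [hj])]
          · rw [h2, hmiss 2 t (by simp [hj])]
          · rw [h3, pv_testBit_or_pow, Bool.or_assoc, hcons 3 t (by simp [hj])]
      · unfold pvStepA
        rw [if_neg hg]
        obtain ⟨a', b', c', d', heq, h0, h1, h2, h3⟩ := ih a b c d
        have hsk : ∀ (j : Int) (t : Nat), 0 ≤ j → j ≤ 3 →
            pvBitA xs j t = pvBitA (p :: xs) j t := by
          intro j t hj0 hj3
          unfold pvBitA
          rw [decide_eq_decide]
          constructor
          · rintro ⟨ht, hm⟩; exact ⟨ht, List.mem_cons_of_mem _ hm⟩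
          · rintro ⟨ht, hm⟩
            rcases List.mem_cons.mp hm with he | hm
            · exfalso; omega
            · exact ⟨ht, hm⟩
        exact ⟨a', b', c', d', heq,
          fun t => by rw [h0, hsk 0 t (by omega) (by omega)],
          fun t => by rw [h1, hsk 1 t (by omega) (by omega)],
          fun t => by rw [h2, hsk 2 t (by omega) (by omega)],
          fun t => by rw [h3, hsk 3 t (by omega) (by omega)]⟩

lemma pvB_char (S : PySem.Set Int) (j : Int) (ks : List Int) : ∀ (v : Nat),
    ∃ v' : Nat, ks.foldl (pvStepB S j) (v : Int) = (v' : Int) ∧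
      ∀ t, v'.testBit t = (v.testBit t ||
        decide (∃ k ∈ ks, PySem.Set.contains S (8 * j + k + 1) = true ∧ (7 - k).toNat = t)) := by
  induction ks with
  | nil => intro v; exact ⟨v, rfl, by simp⟩
  | cons k ks ih =>
      intro v
      rw [List.foldl_cons]
      unfold pvStepB
      by_cases hc : PySem.Set.contains S (8 * j + k + 1) = true
      · rw [if_pos hc, pv_bor_pow]
        obtain ⟨v', heq, hbit⟩ := ih (v ||| 2 ^ (7 - k).toNat)
        refine ⟨v', heq, fun t => ?_⟩
        rw [hbit, pv_testBit_or_pow, Bool.or_assoc]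
        congr 1
        rw [← Bool.decide_or, decide_eq_decide]
        constructor
        · rintro (ht | ⟨k', hk', hck', h7⟩)
          · exact ⟨k, List.mem_cons_self, hc, ht.symm⟩
          · exact ⟨k', List.mem_cons_of_mem _ hk', hck', h7⟩
        · rintro ⟨k', hk', hck', h7⟩
          rcases List.mem_cons.mp hk' with rfl | hk'
          · exact Or.inl h7.symm
          · exact Or.inr ⟨k', hk', hck', h7⟩
      · rw [if_neg hc]
        obtain ⟨v', heq, hbit⟩ := ih v
        refine ⟨v', heq, fun t => ?_⟩
        rw [hbit]
        congr 1
        rw [decide_eq_decide]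
        constructor
        · rintro ⟨k', hk', hck', h7⟩
          exact ⟨k', List.mem_cons_of_mem _ hk', hck', h7⟩
        · rintro ⟨k', hk', hck', h7⟩
          rcases List.mem_cons.mp hk' with rfl | hk'
          · exact absurd hck' hc
          · exact ⟨k', hk', hck', h7⟩

-- the two bit characterizations coincide: bit t of byte j is set iff PID 8j+8-t was listed
lemma pv_bits_eq (pids : List Int) (j : Int) (t : Nat) :
    pvBitA pids j t =
      decide (∃ k ∈ PySem.List.pyRange 0 8 1,
        PySem.Set.contains (PySem.Set.ofList pids) (8 * j + k + 1) = true ∧ (7 - k).toNat = t) := by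
  unfold pvBitA
  rw [decide_eq_decide]
  constructor
  · rintro ⟨ht, hm⟩
    refine ⟨7 - (t : Int), PySem.List.mem_pyRange_one.mpr (by omega), ?_, by omega⟩
    rw [PySem.Set.contains_iff, PySem.Set.mem_ofList]
    have he : 8 * j + (7 - (t : Int)) + 1 = 8 * j + 8 - (t : Int) := by ring
    rw [he]; exact hm
  · rintro ⟨k, hk, hck, h7⟩
    rw [PySem.List.mem_pyRange_one] at hk
    have ht : t < 8 := by omega
    refine ⟨ht, ?_⟩
    rw [PySem.Set.contains_iff, PySem.Set.mem_ofList] at hck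
    have he : 8 * j + 8 - (t : Int) = 8 * j + k + 1 := by omega
    rw [he]; exact hck

-- ===== VERDICT (by name: the statement is the Claim_ definition above) =====
theorem supported_mask_py_spec : Claim_equal_supported_mask_py := by
  intro pids _
  unfold Spec_supported_mask_py supported_mask_py supported_mask_py_alt pvByteB
  dsimp only
  obtain ⟨a', b', c', d', heq, h0, h1, h2, h3⟩ := pvA_fold pids 0 0 0 0
  obtain ⟨v0, hv0, hb0⟩ := pvB_char (PySem.Set.ofList pids) 0 (PySem.List.pyRange 0 8 1) 0
  obtain ⟨v1, hv1, hb1⟩ := pvB_char (PySem.Set.ofList pids) 1 (PySem.List.pyRange 0 8 1) 0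
  obtain ⟨v2, hv2, hb2⟩ := pvB_char (PySem.Set.ofList pids) 2 (PySem.List.pyRange 0 8 1) 0
  obtain ⟨v3, hv3, hb3⟩ := pvB_char (PySem.Set.ofList pids) 3 (PySem.List.pyRange 0 8 1) 0
  push_cast at hv0 hv1 hv2 hv3
  have e0 : a' = v0 := Nat.eq_of_testBit_eq fun t => by
    rw [h0, hb0, pv_bits_eq pids 0 t]
  have e1 : b' = v1 := Nat.eq_of_testBit_eq fun t => by
    rw [h1, hb1, pv_bits_eq pids 1 t]
  have e2 : c' = v2 := Nat.eq_of_testBit_eq fun t => by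
    rw [h2, hb2, pv_bits_eq pids 2 t]
  have e3 : d' = v3 := Nat.eq_of_testBit_eq fun t => by
    rw [h3, hb3, pv_bits_eq pids 3 t]
  rw [show ([0, 0, 0, 0] : List Int) = [((0 : Nat) : Int), ((0 : Nat) : Int), ((0 : Nat) : Int), ((0 : Nat) : Int)] by norm_num,
      heq, hv0, hv1, hv2, hv3, e0, e1, e2, e3]
  simp [PySem.List.pyGetD]
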